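-- pv_equiv track=rewrite | github.com/gogit2194/NOVIX2026 | backend/app/agents/archivist.py | _is_copied_from_source
-- ===== SOURCE A (Python) =====
-- def _is_copied_from_source(description: str, source: str = "") -> bool:
--     if not description or not source:
--         return False
--     text = description.strip()
--     if len(text) < 20:
--         return False
--     if text in source:
--         return True
--     window = 12
--     hits = 0
--     for i in range(0, len(text) - window + 1, 4):
--         frag = text[i : i + window]
--         if frag and frag in source:
--             hits += 1
--             if hits >= 2:
--                 return True
--     return False
-- ===== SOURCE B (Python) =====
-- def _is_copied_from_source(description: str, source: str = "") -> bool: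
--     # Inverted traversal: index the query, stream the corpus.  B counts each
--     # sampled 12-char fragment of the stripped description in a dict, then
--     # makes ONE left-to-right pass over the source's 12-char windows,
--     # crediting every distinct window that matches an indexed fragment with
--     # its multiplicity and stopping as soon as two fragment positions are
--     # accounted for.  The full text-in-source shortcut is redundant: a text of
--     # length >= 20 contained in source makes (at least) the fragments at
--     # offsets 0 and 4 match.
--     text = description.strip()
--     window = 12
--     if len(text) < 20:
--         return False
--     counts = {}
--     for i in range(0, len(text) - window + 1, 4):
--         f = text[i:i + window]
--         counts[f] = counts.get(f, 0) + 1
--     hits = 0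
--     seen = set()
--     for j in range(len(source) - window + 1):
--         g = source[j:j + window]
--         if g in counts and g not in seen:
--             seen.add(g)
--             hits += counts[g]
--             if hits >= 2:
--                 return True
--     return False
-- ===== Notes on version B (the rewrite author's own statement) =====
-- stated objective: faster
-- what changed: B inverts the traversal: instead of probing the whole source once per sampled fragment of the description, it counts the sampled 12-char fragments of the stripped description in a dict, then makes a single left-to-right pass over the source's 12-char windows, crediting each distinct matching window with its fragment multiplicity and early-exiting at two accounted fragment positions; the redundant full-text-in-source shortcut is dropped.
import Mathlib
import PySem

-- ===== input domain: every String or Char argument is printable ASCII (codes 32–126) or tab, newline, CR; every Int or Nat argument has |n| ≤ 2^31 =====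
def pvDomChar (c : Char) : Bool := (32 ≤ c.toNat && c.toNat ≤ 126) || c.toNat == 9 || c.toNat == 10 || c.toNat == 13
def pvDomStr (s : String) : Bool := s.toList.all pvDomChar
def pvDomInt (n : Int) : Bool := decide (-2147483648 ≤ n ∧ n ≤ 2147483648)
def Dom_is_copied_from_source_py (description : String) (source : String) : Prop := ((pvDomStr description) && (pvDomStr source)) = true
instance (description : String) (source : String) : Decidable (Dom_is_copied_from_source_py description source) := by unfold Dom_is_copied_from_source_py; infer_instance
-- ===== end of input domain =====

-- B inverts the traversal: it counts the sampled 12-char fragments of the stripped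
-- description in a dict, then makes one pass over the source's 12-char windows, crediting each
-- distinct matching window with its fragment multiplicity (the full-text shortcut, implied by
-- two fragment hits when len(text) >= 20, is dropped); proved equal on every input.

-- ===== PORT A =====
-- the 'for i in range(...)' loop with early 'return True' once hits reaches 2
def pvLoopA (text source : List Char) : List Int → Nat → Bool
  | [], _ => false
  | i :: rest, hits =>
    let frag := PySem.List.slice text (some i) (some (i + 12))
    if !frag.isEmpty && PySem.Chars.isIn frag source then
      if 2 ≤ hits + 1 then true
      else pvLoopA text source rest (hits + 1)
    else pvLoopA text source rest hits

def is_copied_from_source_py (description : String) (source : String) : Bool :=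
  if description.toList.isEmpty || source.toList.isEmpty then false
  else
    let text := PySem.Chars.strip description.toList
    if text.length < 20 then false
    else if PySem.Chars.isIn text source.toList then true
    else pvLoopA text source.toList (PySem.List.pyRange 0 ((text.length : Int) - 12 + 1) 4) 0

-- ===== PORT B =====
-- counts = {}; for i in range(0, len(text)-12+1, 4): counts[f] = counts.get(f, 0) + 1
def pvCountsB (text : List Char) : PySem.Dict (List Char) Int :=
  (PySem.List.pyRange 0 ((text.length : Int) - 12 + 1) 4).foldl
    (fun d i =>
      let f := PySem.List.slice text (some i) (some (i + 12))
      d.insert f (d.getD f 0 + 1)) PySem.Dict.empty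

-- for j in range(len(source)-12+1): … with early 'return True' once hits reaches 2
def pvLoopB (counts : PySem.Dict (List Char) Int) (source : List Char) :
    List Int → PySem.Set (List Char) → Int → Bool
  | [], _, _ => false
  | j :: rest, seen, hits =>
    let g := PySem.List.slice source (some j) (some (j + 12))
    if counts.contains g && !(PySem.Set.contains seen g) then
      if 2 ≤ hits + counts.getD g 0 then true
      else pvLoopB counts source rest (PySem.Set.add seen g) (hits + counts.getD g 0)
    else pvLoopB counts source rest seen hits

def is_copied_from_source_py_alt (description : String) (source : String) : Bool :=
  let text := PySem.Chars.strip description.toList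
  if text.length < 20 then false
  else
    let counts := pvCountsB text
    pvLoopB counts source.toList
      (PySem.List.pyRange 0 ((source.toList.length : Int) - 12 + 1) 1)
      PySem.Set.empty 0

-- ===== PRECONDITION & SPEC =====
def Spec_is_copied_from_source_py (description : String) (source : String) (out : Bool) : Prop := out = is_copied_from_source_py_alt description source
instance (description : String) (source : String) (out : Bool) : Decidable (Spec_is_copied_from_source_py description source out) := by unfold Spec_is_copied_from_source_py; infer_instance

-- ===== CLAIM (what is proved, stated in full; the proofs are below) =====
def Claim_equal_is_copied_from_source_py : Prop := ∀ (description : String) (source : String), Dom_is_copied_from_source_py description source → Spec_is_copied_from_source_py description source (is_copied_from_source_py description source)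

-- ===== LEMMAS AND PROOFS =====

-- a length-12 slice really has 12 characters when it fits
theorem pv_slice12 (t : List Char) (i : Int) (h0 : 0 ≤ i) (h12 : i + 12 ≤ (t.length : Int)) :
    PySem.List.slice t (some i) (some (i + 12)) = (t.drop i.toNat).take 12 ∧
    (PySem.List.slice t (some i) (some (i + 12))).length = 12 := by
  have he : PySem.List.slice t (some i) (some (i + 12)) = (t.drop i.toNat).take ((i + 12).toNat - i.toNat) :=
    PySem.List.slice_toNat t h0 (by omega)
  have hn : (i + 12).toNat - i.toNat = 12 := by omega
  rw [hn] at he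
  refine ⟨he, ?_⟩
  rw [he]
  have : (t.drop i.toNat).length = t.length - i.toNat := List.length_drop ..
  simp [List.length_take, this]
  omega

-- membership in the list of source 12-grams is exactly substring containment, for 12-char fragments
theorem pv_mem_srcGrams (s frag : List Char) (hf : frag.length = 12) :
    frag ∈ (PySem.List.pyRange 0 ((s.length : Int) - 12 + 1) 1).map
      (fun j => PySem.List.slice s (some j) (some (j + 12))) ↔
    PySem.Chars.isIn frag s = true := by
  constructor
  · intro hmem
    rcases List.mem_map.mp hmem with ⟨i, hi, hslice⟩
    rcases (PySem.List.mem_pyRange_iff_of_pos (by norm_num) i).mp hi with ⟨hi0, hilt, -⟩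
    obtain ⟨he, _⟩ := pv_slice12 s i hi0 (by omega)
    rw [PySem.Chars.isIn_iff_infix]
    rw [← hslice, he]
    exact ((s.drop i.toNat).take_prefix 12).isInfix.trans (s.drop_suffix i.toNat).isInfix
  · intro h
    rcases (PySem.Chars.isIn_iff_infix frag s).mp h with ⟨u, v, huv⟩
    have hlen : u.length + 12 + v.length = s.length := by
      rw [← huv]; simp [hf]; omega
    apply List.mem_map.mpr
    refine ⟨(u.length : Int), ?_, ?_⟩
    · exact (PySem.List.mem_pyRange_iff_of_pos (by norm_num) _).mpr
        ⟨Int.natCast_nonneg u.length, by omega, by simp⟩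
    · have h0 : (0 : Int) ≤ (u.length : Int) := Int.natCast_nonneg u.length
      obtain ⟨he, _⟩ := pv_slice12 s (u.length : Int) h0 (by omega)
      rw [he]
      have hdrop : s.drop u.length = frag ++ v := by
        rw [← huv, List.append_assoc, List.drop_left]
      simp [hdrop, ← hf]

-- two distinct members satisfying p force at least two counted hits
theorem pv_two_le_countP {l : List Int} {p : Int → Bool} {x y : Int}
    (hx : x ∈ l) (hy : y ∈ l) (hxy : x ≠ y) (hpx : p x = true) (hpy : p y = true) :
    2 ≤ l.countP p := by
  have hx' : x ∈ l.filter p := List.mem_filter.mpr ⟨hx, hpx⟩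
  have hy' : y ∈ l.filter p := List.mem_filter.mpr ⟨hy, hpy⟩
  rw [List.countP_eq_length_filter]
  rcases hfl : l.filter p with _ | ⟨a, _ | ⟨b, rest⟩⟩
  · rw [hfl] at hx'; simp at hx'
  · rw [hfl] at hx' hy'
    simp at hx' hy'
    exact absurd (hx'.trans hy'.symm) hxy
  · simp

-- A's early-exit counting loop returns exactly "at least 2 hits in the whole range"
theorem pvLoopA_eq (t s : List Char) (l : List Int) (h : Nat) (hh : h ≤ 1) :
    pvLoopA t s l h = decide (2 ≤ h + l.countP (fun i =>
      !(PySem.List.slice t (some i) (some (i + 12))).isEmpty &&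
        PySem.Chars.isIn (PySem.List.slice t (some i) (some (i + 12))) s)) := by
  induction l generalizing h with
  | nil => simp [pvLoopA]; omega
  | cons i rest ih =>
    simp only [pvLoopA, List.countP_cons]
    by_cases hp : (!(PySem.List.slice t (some i) (some (i + 12))).isEmpty &&
        PySem.Chars.isIn (PySem.List.slice t (some i) (some (i + 12))) s) = true
    · rw [if_pos hp]
      simp only [hp, if_true]
      by_cases h1 : h = 1
      · subst h1
        rw [if_pos (by omega : 2 ≤ 1 + 1)]
        symm
        rw [decide_eq_true_eq]
        omega
      · have h0 : h = 0 := by omega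
        subst h0
        rw [if_neg (by omega : ¬ 2 ≤ 0 + 1)]
        rw [ih 1 (by omega)]
        rw [decide_eq_decide]
        omega
    · rw [if_neg hp]
      rw [ih h hh]
      simp only [hp, Bool.false_eq_true, if_false]
      rw [decide_eq_decide]
      omega

theorem pv_strip_nil : PySem.Chars.strip ([] : List Char) = [] := rfl

-- B's loop with the early exit removed: the final value of hits
def pvF (counts : PySem.Dict (List Char) Int) (source : List Char) :
    List Int → PySem.Set (List Char) → Int → Int
  | [], _, hits => hits
  | j :: rest, seen, hits =>
    let g := PySem.List.slice source (some j) (some (j + 12))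
    if counts.contains g && !(PySem.Set.contains seen g) then
      pvF counts source rest (PySem.Set.add seen g) (hits + counts.getD g 0)
    else pvF counts source rest seen hits

-- all stored counts are at least 1
def pvPos (counts : PySem.Dict (List Char) Int) : Prop :=
  ∀ g, counts.contains g = true → 1 ≤ counts.getD g 0

theorem pvF_mono (counts : PySem.Dict (List Char) Int) (source : List Char)
    (hpos : pvPos counts) (l : List Int) (seen : PySem.Set (List Char)) (h : Int) :
    h ≤ pvF counts source l seen h := by
  induction l generalizing seen h with
  | nil => simp [pvF]
  | cons j rest ih =>
    simp only [pvF]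
    split_ifs with hc
    · have := hpos _ (by exact (Bool.and_eq_true .. ▸ hc).1)
      exact le_trans (by omega) (ih ..)
    · exact ih ..

-- the early-exit loop returns exactly "the final hits reach 2"
theorem pvLoopB_eq (counts : PySem.Dict (List Char) Int) (source : List Char)
    (hpos : pvPos counts) (l : List Int) (seen : PySem.Set (List Char)) (h : Int) (hh : h ≤ 1) :
    pvLoopB counts source l seen h = decide (2 ≤ pvF counts source l seen h) := by
  induction l generalizing seen h with
  | nil => simp [pvLoopB, pvF]; omega
  | cons j rest ih =>
    simp only [pvLoopB, pvF]
    split_ifs with hc h2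
    · symm
      rw [decide_eq_true_eq]
      exact le_trans h2 (pvF_mono counts source hpos ..)
    · exact ih _ _ (by omega)
    · exact ih _ _ hh

-- the final hits value is the sum, over the distinct source grams that are unseen keys,
-- of their stored counts
theorem pvF_sum (counts : PySem.Dict (List Char) Int) (source : List Char)
    (l : List Int) (seen : PySem.Set (List Char)) (h : Int) :
    pvF counts source l seen h = h +
      ∑ x ∈ ((l.map (fun j => PySem.List.slice source (some j) (some (j + 12)))).toFinset.filter
        (fun x => counts.contains x = true ∧ x ∉ seen)), counts.getD x 0 := by
  induction l generalizing seen h with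
  | nil => simp [pvF]
  | cons j rest ih =>
    simp only [pvF, List.map_cons, List.toFinset_cons]
    set g := PySem.List.slice source (some j) (some (j + 12)) with hg
    set T := (rest.map (fun j => PySem.List.slice source (some j) (some (j + 12)))).toFinset with hT
    by_cases hc : (counts.contains g && !(PySem.Set.contains seen g)) = true
    · rw [if_pos hc]
      have hck : counts.contains g = true := (Bool.and_eq_true .. ▸ hc).1
      have hcs : g ∉ seen := by
        have := (Bool.and_eq_true .. ▸ hc).2
        simp only [Bool.not_eq_true'] at this
        intro hmem
        rw [(PySem.Set.contains_iff seen g).mpr hmem] at this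
        simp at this
      rw [ih]
      have hfilt : T.filter (fun x => counts.contains x = true ∧ x ∉ PySem.Set.add seen g) =
          (T.filter (fun x => counts.contains x = true ∧ x ∉ seen)).erase g := by
        ext x
        simp only [Finset.mem_filter, Finset.mem_erase, PySem.Set.mem_add]
        tauto
      have hins : (insert g T).filter (fun x => counts.contains x = true ∧ x ∉ seen) =
          insert g ((T.filter (fun x => counts.contains x = true ∧ x ∉ seen)).erase g) := by
        ext x
        simp only [Finset.mem_filter, Finset.mem_insert, Finset.mem_erase]
        by_cases hxg : x = g
        · subst hxg
          simp [hck, hcs]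
        · tauto
      rw [hfilt, hins, Finset.sum_insert (Finset.notMem_erase g _)]
      ring
    · rw [if_neg hc]
      rw [ih]
      have hPg : ¬ (counts.contains g = true ∧ g ∉ seen) := by
        intro ⟨hk, hs⟩
        apply hc
        rw [hk]
        simp only [Bool.true_and, Bool.not_eq_true']
        rw [Bool.eq_false_iff]
        intro hcon
        exact hs ((PySem.Set.contains_iff seen g).mp hcon)
      have : (insert g T).filter (fun x => counts.contains x = true ∧ x ∉ seen) =
          T.filter (fun x => counts.contains x = true ∧ x ∉ seen) := by
        ext x
        simp only [Finset.mem_filter, Finset.mem_insert]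
        by_cases hxg : x = g
        · subst hxg
          tauto
        · tauto
      rw [this]

-- summing multiplicities over all grams of a finite set counts the fragments lying in the set
theorem pv_sum_count_full (G : Finset (List Char)) (f : List (List Char)) :
    ∑ x ∈ G, f.count x = f.countP (fun a => decide (a ∈ G)) := by
  induction f with
  | nil => simp
  | cons a f ih =>
    simp only [List.countP_cons, List.count_cons]
    rw [Finset.sum_add_distrib, ih]
    have : ∑ x ∈ G, (if (a == x) = true then 1 else 0) =
        ∑ x ∈ G, (if x = a then 1 else 0) := by
      apply Finset.sum_congr rfl
      intro x _
      by_cases h : x = a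
      · subst h; simp
      · have hb : (a == x) = false := by simp [Ne.symm h]
        simp [hb, h]
    rw [this, Finset.sum_ite_eq']
    by_cases hA : a ∈ G <;> simp [hA]

-- restricting the sum to the grams that actually occur among the fragments changes nothing
theorem pv_sum_count_nat (G : Finset (List Char)) (f : List (List Char)) :
    ∑ x ∈ G.filter (fun x => x ∈ f), f.count x = f.countP (fun a => decide (a ∈ G)) := by
  rw [Finset.sum_subset (Finset.filter_subset _ G)
    (fun x _ hx => List.count_eq_zero.mpr
      (fun hmem => hx (Finset.mem_filter.mpr ⟨‹x ∈ G›, hmem⟩)))]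
  exact pv_sum_count_full G f

-- ===== VERDICT (by name: the statement is the Claim_ definition above) =====
theorem is_copied_from_source_py_spec : Claim_equal_is_copied_from_source_py := by
  intro d s _
  unfold Spec_is_copied_from_source_py is_copied_from_source_py is_copied_from_source_py_alt
  set t := PySem.Chars.strip d.toList with ht
  by_cases hn : t.length < 20
  · simp only [hn, if_true]
    split_ifs <;> rfl
  · have hn' : 20 ≤ t.length := by omega
    have hd : d.toList.isEmpty = false := by
      rcases hl : d.toList with _ | ⟨c, cs⟩
      · exfalso
        rw [hl, pv_strip_nil] at ht
        rw [ht] at hn'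
        simp at hn'
      · rfl
    by_cases hs : s.toList = []
    · -- A returns False at the emptiness guard; B's source pass visits no window
      rw [hd, hs]
      have hr : PySem.List.pyRange 0 ((([] : List Char).length : Int) - 12 + 1) 1 = ([] : List Int) := by decide
      simp only [List.isEmpty_nil, Bool.or_true, if_true, if_neg hn, hr]
      rfl
    · have hs' : s.toList.isEmpty = false := by simp [hs]
      rw [hd, hs']
      simp only [Bool.or_self, Bool.false_eq_true, if_false, if_neg hn]
      -- name the pieces
      set sampled := PySem.List.pyRange 0 ((t.length : Int) - 12 + 1) 4 with hsampled
      set gramT := fun i => PySem.List.slice t (some i) (some (i + 12)) with hgramT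
      set gramS := fun j => PySem.List.slice s.toList (some j) (some (j + 12)) with hgramS
      set srcIdx := PySem.List.pyRange 0 ((s.toList.length : Int) - 12 + 1) 1 with hsrcIdx
      set frags := sampled.map gramT with hfrags
      set G := (srcIdx.map gramS).toFinset with hG
      -- fragments sampled in range are 12 characters long
      have hsbound : ∀ i ∈ sampled, 0 ≤ i ∧ i + 12 ≤ (t.length : Int) := by
        intro i hi
        rcases (PySem.List.mem_pyRange_iff_of_pos (by norm_num) i).mp hi with ⟨hi0, hilt, -⟩
        exact ⟨hi0, by omega⟩
      -- B's dict is the fragment counter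
      have hcounts : pvCountsB t = PySem.Dict.counter frags := by
        rw [hfrags, ← PySem.Dict.foldl_insert_getD_add_one_eq_counter, List.foldl_map]
        rfl
      have hpos : pvPos (PySem.Dict.counter frags) := by
        intro g hg
        rw [PySem.Dict.contains_counter] at hg
        rw [PySem.Dict.getD_counter]
        have : g ∈ frags := by simpa using hg
        exact_mod_cast List.count_pos_iff.mpr this
      rw [hcounts, pvLoopB_eq _ _ hpos _ _ 0 (by omega), pvF_sum]
      -- the unseen-keys filter at start is just "occurs among the fragments"
      have hfe : ((srcIdx.map gramS).toFinset.filter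
          (fun x => (PySem.Dict.counter frags).contains x = true ∧ x ∉ PySem.Set.empty)) =
          G.filter (fun x => x ∈ frags) := by
        rw [hG]
        apply Finset.filter_congr
        intro x _
        simp [PySem.Dict.contains_counter, PySem.Set.empty]
      rw [hfe]
      have hgd : ∑ x ∈ G.filter (fun x => x ∈ frags), (PySem.Dict.counter frags).getD x 0 =
          ((frags.countP (fun a => decide (a ∈ G)) : Nat) : Int) := by
        rw [Finset.sum_congr rfl (fun x _ => PySem.Dict.getD_counter frags x)]
        rw [← Nat.cast_sum, pv_sum_count_nat]
      rw [hgd, hfrags, List.countP_map]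
      -- both predicates are "the sampled fragment occurs in source"
      have hpred : sampled.countP ((fun a => decide (a ∈ G)) ∘ gramT) =
          sampled.countP (fun i => PySem.Chars.isIn (gramT i) s.toList) := by
        apply List.countP_congr
        intro i hi
        obtain ⟨hi0, hi12⟩ := hsbound i hi
        obtain ⟨-, hlen⟩ := pv_slice12 t i hi0 hi12
        simp only [Function.comp_apply, decide_eq_true_eq, List.mem_toFinset, hG]
        exact pv_mem_srcGrams s.toList (gramT i) hlen
      rw [hpred]
      -- A's side
      have hA2 : ∀ (hh : PySem.Chars.isIn t s.toList = true),
          2 ≤ sampled.countP (fun i => PySem.Chars.isIn (gramT i) s.toList) := by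
        intro hh
        have htinf : t <:+: s.toList := (PySem.Chars.isIn_iff_infix t s.toList).mp hh
        have hhit : ∀ i : Int, 0 ≤ i → i + 12 ≤ (t.length : Int) →
            PySem.Chars.isIn (gramT i) s.toList = true := by
          intro i hi0 hi12
          obtain ⟨he, -⟩ := pv_slice12 t i hi0 hi12
          rw [PySem.Chars.isIn_iff_infix]
          refine List.IsInfix.trans ?_ htinf
          rw [hgramT]
          simp only []
          rw [he]
          exact ((t.drop i.toNat).take_prefix 12).isInfix.trans (t.drop_suffix i.toNat).isInfix
        have hmem : ∀ i : Int, 0 ≤ i → i < (t.length : Int) - 12 + 1 → (4 : Int) ∣ i →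
            i ∈ sampled := by
          intro i h0 hlt hdvd
          exact (PySem.List.mem_pyRange_iff_of_pos (by norm_num) i).mpr ⟨h0, hlt, by simpa using hdvd⟩
        exact pv_two_le_countP
          (hmem 0 (by norm_num) (by omega) ⟨0, by norm_num⟩)
          (hmem 4 (by norm_num) (by omega) ⟨1, by norm_num⟩)
          (by norm_num) (hhit 0 (by norm_num) (by omega)) (hhit 4 (by norm_num) (by omega))
      by_cases hin : PySem.Chars.isIn t s.toList = true
      · rw [if_pos hin]
        symm
        rw [decide_eq_true_eq]
        have := hA2 hin
        omega
      · rw [if_neg hin]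
        rw [pvLoopA_eq t s.toList sampled 0 (by omega)]
        have hc : sampled.countP (fun i =>
            !(PySem.List.slice t (some i) (some (i + 12))).isEmpty &&
              PySem.Chars.isIn (PySem.List.slice t (some i) (some (i + 12))) s.toList) =
            sampled.countP (fun i => PySem.Chars.isIn (gramT i) s.toList) := by
          apply List.countP_congr
          intro i hi
          obtain ⟨hi0, hi12⟩ := hsbound i hi
          obtain ⟨-, hlen⟩ := pv_slice12 t i hi0 hi12
          have hne : (PySem.List.slice t (some i) (some (i + 12))).isEmpty = false := by
            rcases hfl : PySem.List.slice t (some i) (some (i + 12)) with _ | ⟨a, as⟩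
            · rw [hfl] at hlen; simp at hlen
            · rfl
          rw [hne]
          simp [hgramT]
        rw [hc, decide_eq_decide]
        omega
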